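-- pv_equiv track=rewrite | github.com/Alena4560/Regular-Expressions | regular-expressions.py | double_check
-- ===== SOURCE A (Python) =====
-- from typing import List, Optional
--
-- def double_check(data: List[List]) -> List[List]:
--     names_dict = {}
--     result = []
--
--     for line in data:
--         name_tuple = (line[0], line[1])
--         if name_tuple in names_dict:
--             number = names_dict[name_tuple]
--             for i in range(3, 7):
--                 if result[number][i] == '':
--                     result[number][i] = line[i]
--         else:
--             result.append(line)
--             number = len(result) - 1
--             names_dict[name_tuple] = number
--
--     return result
-- ===== SOURCE B (Python) =====
-- def double_check(data):
--     # Two-staged approach: first group all rows by (row[0], row[1]); then for each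
--     # group emit the first row with fields 3..6 computed column-wise as the first
--     # non-empty value in the group (instead of A's incremental fill of a result list).
--     # Return-value equivalence only: A mutates its input rows in place, B does not.
--     groups = {}
--     for line in data:
--         groups.setdefault((line[0], line[1]), []).append(line)
--     out = []
--     for rows in groups.values():
--         first = rows[0]
--         if len(rows) == 1:
--             out.append(first)
--         else:
--             merged = list(first)
--             for i in range(3, 7):
--                 merged[i] = next((r[i] for r in rows if r[i] != ''), '')
--             out.append(merged)
--     return out
-- ===== Notes on version B (the rewrite author's own statement) =====
-- stated objective: alternative
-- what changed: B is two-staged instead of A's single-pass incremental fill: it first groups all rows by (row[0], row[1]) into a dict of lists, then emits per group the first row with fields 3-6 each computed column-wise as the first non-empty value in the group, replacing A's result list, key-to-index dict and in-place mutation; Pre_ excludes rows shorter than 2 and duplicate-key rows shorter than 7, on which A raises IndexError except in an accidental corner (stored fields 3-6 already non-empty so the short duplicate is never indexed) where both programs return the same value.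
import Mathlib
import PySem

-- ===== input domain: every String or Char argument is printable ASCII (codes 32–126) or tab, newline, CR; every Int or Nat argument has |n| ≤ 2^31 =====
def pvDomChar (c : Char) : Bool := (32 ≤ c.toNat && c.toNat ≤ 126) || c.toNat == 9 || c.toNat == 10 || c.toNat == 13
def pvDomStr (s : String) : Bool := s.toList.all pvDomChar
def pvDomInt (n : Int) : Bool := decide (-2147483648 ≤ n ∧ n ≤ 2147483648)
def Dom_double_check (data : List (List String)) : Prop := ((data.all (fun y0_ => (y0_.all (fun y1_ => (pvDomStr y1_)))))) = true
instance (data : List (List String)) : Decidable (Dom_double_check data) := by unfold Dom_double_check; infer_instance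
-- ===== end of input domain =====

-- B is two-staged instead of A's single-pass incremental fill: it first groups all rows by
-- (line[0], line[1]) into a dict of lists, then emits per group the first row with fields 3-6
-- computed column-wise as the first non-empty value in the group; equivalence is about the
-- RETURN value only (Python A mutates its input rows in place, Python B does not).


-- name_tuple = (line[0], line[1]); pyGetD is exact here since Pre_ gives 2 ≤ line.length
def dcKey (line : List String) : String × String :=
  (PySem.List.pyGetD line 0 "", PySem.List.pyGetD line 1 "")

-- ===== PORT A =====
-- the inner 'for i in range(3, 7)' loop over result[number]; pyGetD is exact under Pre_
-- (both rows have length ≥ 7 whenever this loop runs)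
def dcMergeA (row line : List String) : List String :=
  (PySem.List.pyRange 3 7 1).foldl
    (fun r i => if PySem.List.pyGetD r i "" = "" then r.set i.toNat (PySem.List.pyGetD line i "") else r)
    row

def dcStepA (st : PySem.Dict (String × String) Nat × List (List String)) (line : List String) :
    PySem.Dict (String × String) Nat × List (List String) :=
  let name_tuple := dcKey line
  match st.1.get? name_tuple with
  | some number => (st.1, st.2.set number (dcMergeA (st.2.getD number []) line))
  | none =>
      let result := st.2 ++ [line]
      let number := result.length - 1
      (st.1.insert name_tuple number, result)

def double_check (data : List (List String)) : List (List String) :=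
  (data.foldl dcStepA (PySem.Dict.empty, [])).2

-- ===== PORT B =====
-- groups.setdefault((line[0], line[1]), []).append(line)
def dcGroupStep (groups : PySem.Dict (String × String) (List (List String))) (line : List String) :
    PySem.Dict (String × String) (List (List String)) :=
  groups.modify (dcKey line) [] (fun l => l ++ [line])

-- next((r[i] for r in rows if r[i] != ''), '')
def dcFirstNonEmpty (rows : List (List String)) (i : Int) : String :=
  match rows.find? (fun r => PySem.List.pyGetD r i "" != "") with
  | some r => PySem.List.pyGetD r i ""
  | none => ""

-- per-group body of B's second loop
def dcMergeGroup (rows : List (List String)) : List String :=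
  let first := PySem.List.pyGetD rows 0 []
  if rows.length = 1 then first
  else (PySem.List.pyRange 3 7 1).foldl
         (fun m i => m.set i.toNat (dcFirstNonEmpty rows i)) first

def double_check_alt (data : List (List String)) : List (List String) :=
  ((data.foldl dcGroupStep PySem.Dict.empty).values).map dcMergeGroup

-- ===== PRECONDITION & SPEC =====
-- Pre_ excludes rows shorter than 2 and duplicate-key rows shorter than 7: on these A raises
-- IndexError, except in an accidental corner (the stored row's fields 3–6 already all non-empty,
-- so the short duplicate line is never indexed) where both programs return the same value.
def Pre_double_check (data : List (List String)) : Prop :=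
  ∀ r ∈ data, 2 ≤ r.length ∧ (2 ≤ data.countP (fun r' => dcKey r' == dcKey r) → 7 ≤ r.length)
instance (data : List (List String)) : Decidable (Pre_double_check data) := by
  unfold Pre_double_check; infer_instance

def pvWitness_double_check : List (List String) :=
  [["a", "b", "c", "1", "", "3", ""], ["a", "b", "c", "", "2", "", "4"], ["d", "e"]]

def Spec_double_check (data : List (List String)) (out : List (List String)) : Prop :=
  out = double_check_alt data
instance (data : List (List String)) (out : List (List String)) : Decidable (Spec_double_check data out) := by
  unfold Spec_double_check; infer_instance

-- ===== CLAIM (what is proved, stated in full; the proofs are below) =====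
def Claim_equal_double_check : Prop :=
  ∀ (data : List (List String)), Dom_double_check data → Pre_double_check data →
    Spec_double_check data (double_check data)

-- ===== LEMMAS AND PROOFS =====

-- sequential fill of a group, as A performs it on the stored first-occurrence row
def seqMerge : List (List String) → List String
  | [] => []
  | h :: t => t.foldl dcMergeA h

-- column fold: first-non-empty-wins accumulator over field i of the rows t
def dcCF (a : String) (i : Int) (t : List (List String)) : String :=
  t.foldl (fun x r => if x = "" then PySem.List.pyGetD r i "" else x) a

-- the rows of pref whose key is k (B's group for k, in order)
def dcFilt (pref : List (List String)) (k : String × String) : List (List String) :=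
  pref.filter (fun r => dcKey r == k)

-- A's inner loop computed in closed form on rows of length ≥ 7
set_option maxHeartbeats 1000000 in
lemma mergeA_closed (a0 a1 a2 a3 a4 a5 a6 b0 b1 b2 b3 b4 b5 b6 : String) (rt lt : List String) :
    dcMergeA (a0::a1::a2::a3::a4::a5::a6::rt) (b0::b1::b2::b3::b4::b5::b6::lt)
      = a0::a1::a2::(if a3 = "" then b3 else a3)::(if a4 = "" then b4 else a4)::
        (if a5 = "" then b5 else a5)::(if a6 = "" then b6 else a6)::rt := by
  have hrange : PySem.List.pyRange 3 7 1 = [3,4,5,6] := rfl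
  rw [dcMergeA, hrange]
  simp only [List.foldl_cons, List.foldl_nil, PySem.List.pyGetD_ofNat']
  by_cases h3 : a3 = "" <;> by_cases h4 : a4 = "" <;> by_cases h5 : a5 = "" <;> by_cases h6 : a6 = "" <;>
    simp [List.set, h3, h4, h5, h6]

lemma dcCF_ne (a : String) (i : Int) (t : List (List String)) (ha : a ≠ "") : dcCF a i t = a := by
  induction t with
  | nil => rfl
  | cons r t ih => simpa [dcCF, ha] using ih

lemma fne_eq_cf (rows : List (List String)) (i : Int) :
    dcFirstNonEmpty rows i = dcCF "" i rows := by
  induction rows with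
  | nil => rfl
  | cons r t ih =>
    have hstep : dcCF "" i (r :: t) = dcCF (PySem.List.pyGetD r i "") i t := by simp [dcCF]
    by_cases h : PySem.List.pyGetD r i "" = ""
    · rw [hstep, h, ← ih]
      simp [dcFirstNonEmpty, h]
    · have hb : (PySem.List.pyGetD r i "" != "") = true := by simpa using h
      have hfind : dcFirstNonEmpty (r :: t) i = PySem.List.pyGetD r i "" := by
        simp [dcFirstNonEmpty, hb]
      rw [hfind, hstep, dcCF_ne _ _ _ h]

-- the sequential fill in closed form, over rows of length ≥ 7
lemma seq_closed (t : List (List String)) (ht : ∀ r ∈ t, 7 ≤ r.length) :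
    ∀ a0 a1 a2 a3 a4 a5 a6 (rt : List String),
    t.foldl dcMergeA (a0::a1::a2::a3::a4::a5::a6::rt)
      = a0::a1::a2::dcCF a3 3 t::dcCF a4 4 t::dcCF a5 5 t::dcCF a6 6 t::rt := by
  induction t with
  | nil => intro a0 a1 a2 a3 a4 a5 a6 rt; rfl
  | cons b t ih =>
    intro a0 a1 a2 a3 a4 a5 a6 rt
    obtain ⟨b0,b1,b2,b3,b4,b5,b6,bt,rfl⟩ :
        ∃ b0 b1 b2 b3 b4 b5 b6 bt, b = b0::b1::b2::b3::b4::b5::b6::bt := by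
      match b, ht b (by simp) with
      | b0::b1::b2::b3::b4::b5::b6::bt, _ => exact ⟨b0,b1,b2,b3,b4,b5,b6,bt,rfl⟩
    rw [List.foldl_cons, mergeA_closed, ih (fun r hr => ht r (by simp [hr]))]
    simp [dcCF, PySem.List.pyGetD_ofNat']

-- B's per-group body in closed form on a group of size ≥ 2 with a long first row
lemma mergeGroup_closed (a0 a1 a2 a3 a4 a5 a6 : String) (rt : List String)
    (t : List (List String)) (ht : t ≠ []) :
    dcMergeGroup ((a0::a1::a2::a3::a4::a5::a6::rt) :: t)
      = a0::a1::a2::dcFirstNonEmpty ((a0::a1::a2::a3::a4::a5::a6::rt) :: t) 3::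
        dcFirstNonEmpty ((a0::a1::a2::a3::a4::a5::a6::rt) :: t) 4::
        dcFirstNonEmpty ((a0::a1::a2::a3::a4::a5::a6::rt) :: t) 5::
        dcFirstNonEmpty ((a0::a1::a2::a3::a4::a5::a6::rt) :: t) 6::rt := by
  have hlen : ((a0::a1::a2::a3::a4::a5::a6::rt) :: t).length ≠ 1 := by
    cases t with
    | nil => exact absurd rfl ht
    | cons x xs => simp
  have hrange : PySem.List.pyRange 3 7 1 = [3,4,5,6] := rfl
  rw [dcMergeGroup, hrange]
  simp [ht, PySem.List.pyGetD_ofNat', List.set]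

-- the two merge computations agree on a nonempty group (rows ≥ 7 when the group has ≥ 2 rows)
lemma seq_eq_mergeGroup (rows : List (List String)) (hne : rows ≠ [])
    (hlen : 1 < rows.length → ∀ r ∈ rows, 7 ≤ r.length) :
    seqMerge rows = dcMergeGroup rows := by
  cases rows with
  | nil => exact absurd rfl hne
  | cons h t =>
    cases t with
    | nil => simp [seqMerge, dcMergeGroup, PySem.List.pyGetD_ofNat']
    | cons b t' =>
      have h7 : ∀ r ∈ h :: b :: t', 7 ≤ r.length := hlen (by simp)
      obtain ⟨a0,a1,a2,a3,a4,a5,a6,rt,rfl⟩ :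
          ∃ a0 a1 a2 a3 a4 a5 a6 rt, h = a0::a1::a2::a3::a4::a5::a6::rt := by
        match h, h7 h (by simp) with
        | a0::a1::a2::a3::a4::a5::a6::rt, _ => exact ⟨a0,a1,a2,a3,a4,a5,a6,rt,rfl⟩
      rw [seqMerge, seq_closed (b :: t') (fun r hr => h7 r (by simp [hr])),
        mergeGroup_closed _ _ _ _ _ _ _ _ _ (by simp)]
      simp [fne_eq_cf, dcCF, PySem.List.pyGetD_ofNat']

lemma map_set_key {α : Type} (keys : List (String × String)) (f : String × String → α)
    (j : Nat) (k : String × String) (v : α) (hnd : keys.Nodup) (hj : j < keys.length)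
    (hk : keys.getD j ("", "") = k) :
    (keys.map f).set j v = keys.map (fun k' => if k' = k then v else f k') := by
  induction keys generalizing j with
  | nil => simp at hj
  | cons a t ih =>
    cases j with
    | zero =>
      have ha : a = k := by simpa using hk
      simp only [List.map_cons, List.set_cons_zero, ha]
      congr 1
      apply List.map_congr_left
      intro x hx
      have : x ≠ k := by rintro rfl; rw [ha] at hnd; simp_all
      simp [this]
    | succ j' =>
      have hj' : j' < t.length := by simpa using hj
      have hk' : t.getD j' ("", "") = k := by simpa using hk
      have hmem : k ∈ t := by
        rw [← hk', List.getD_eq_getElem _ _ hj']; exact List.getElem_mem _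
      have ha : a ≠ k := by rintro rfl; simp_all
      simp only [List.map_cons, List.set_cons_succ]
      rw [ih j' (List.Nodup.of_cons hnd) hj' hk']
      simp [ha]

-- lookup in the index dict built from keys.zipIdx
lemma idxLookup (keys : List (String × String)) (n0 : Nat) (k : String × String) :
    ((PySem.Dict.mk (keys.zipIdx n0)).get? k = none ∧ k ∉ keys)
    ∨ ∃ j, ∃ _ : j < keys.length,
        (PySem.Dict.mk (keys.zipIdx n0)).get? k = some (n0 + j) ∧ keys.getD j ("", "") = k := by
  induction keys generalizing n0 with
  | nil => left; exact ⟨rfl, by simp⟩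
  | cons a t ih =>
    by_cases ha : a = k
    · right
      exact ⟨0, by simp, by simp [List.zipIdx_cons, PySem.Dict.get?_mk_cons, ha], by simpa using ha⟩
    · have hbeq : (a == k) = false := by simpa using ha
      rcases ih (n0 + 1) with ⟨h1, h2⟩ | ⟨j, hj, h1, h2⟩
      · left
        refine ⟨?_, ?_⟩
        · simpa [List.zipIdx_cons, PySem.Dict.get?_mk_cons, hbeq] using h1
        · simp only [List.mem_cons, not_or]
          exact ⟨fun h => ha h.symm, h2⟩
      · right
        refine ⟨j + 1, by simpa using Nat.succ_lt_succ hj, ?_, by simpa using h2⟩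
        simp only [List.zipIdx_cons, PySem.Dict.get?_mk_cons, hbeq, Bool.false_eq_true, if_false]
        rw [h1]; congr 1; omega

lemma seqMerge_append (g : List (List String)) (l : List String) (hg : g ≠ []) :
    seqMerge (g ++ [l]) = dcMergeA (seqMerge g) l := by
  cases g with
  | nil => exact absurd rfl hg
  | cons h t => simp [seqMerge, List.foldl_append]

-- main simulation invariant: both folds, driven by the same ordered key list
lemma dc_loop (data : List (List String)) (hpre : Pre_double_check data) :
    ∀ rest pref (keys : List (String × String)), data = pref ++ rest →
      keys.Nodup →
      (∀ k, k ∈ keys ↔ ∃ r ∈ pref, dcKey r = k) →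
      (rest.foldl dcStepA (PySem.Dict.mk (keys.zipIdx 0),
          keys.map (fun k => seqMerge (dcFilt pref k)))).2
        = ((rest.foldl dcGroupStep
            (PySem.Dict.mk (keys.map (fun k => (k, dcFilt pref k))))).values).map dcMergeGroup := by
  intro rest
  induction rest with
  | nil =>
    intro pref keys hdata hnd hkeys
    simp only [List.foldl_nil, PySem.Dict.values_mk, List.map_map]
    apply List.map_congr_left
    intro k hk
    obtain ⟨r0, hr0, hr0k⟩ := (hkeys k).1 hk
    have hne : dcFilt pref k ≠ [] := by
      have hmem : r0 ∈ dcFilt pref k := by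
        simp [dcFilt, List.mem_filter, hr0, hr0k]
      intro h; rw [h] at hmem; simp at hmem
    have hdp : data = pref := by simpa using hdata
    refine seq_eq_mergeGroup _ hne ?_
    intro hlen r hr
    have hrmem : r ∈ pref := (List.mem_filter.1 hr).1
    have hrk : dcKey r = k := by simpa using (List.mem_filter.1 hr).2
    have hcnt : 2 ≤ data.countP (fun r' => dcKey r' == dcKey r) := by
      rw [hdp, hrk]
      have hc : pref.countP (fun r' => dcKey r' == k) = (dcFilt pref k).length :=
        List.countP_eq_length_filter
      omega
    exact (hpre r (hdp ▸ hrmem)).2 hcnt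
  | cons line rest' ih =>
    intro pref keys hdata hnd hkeys
    have hdata' : data = (pref ++ [line]) ++ rest' := by rw [hdata]; simp
    simp only [List.foldl_cons]
    have hfilt_ne : ∀ k', k' ≠ dcKey line → dcFilt (pref ++ [line]) k' = dcFilt pref k' := by
      intro k' hne
      have : (dcKey line == k') = false := by simpa using fun h => hne h.symm
      simp [dcFilt, List.filter_append, this]
    have hfilt_k : dcFilt (pref ++ [line]) (dcKey line) = dcFilt pref (dcKey line) ++ [line] := by
      simp [dcFilt, List.filter_append]
    by_cases hk : dcKey line ∈ keys
    · rcases idxLookup keys 0 (dcKey line) with ⟨_, hnot⟩ | ⟨j, hj, hget, hgd⟩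
      · exact absurd hk hnot
      obtain ⟨r0, hr0, hr0k⟩ := (hkeys _).1 hk
      have hne : dcFilt pref (dcKey line) ≠ [] := by
        have hmem : r0 ∈ dcFilt pref (dcKey line) := by
          simp [dcFilt, List.mem_filter, hr0, hr0k]
        intro h; rw [h] at hmem; simp at hmem
      have hgetD : (keys.map (fun k' => seqMerge (dcFilt pref k'))).getD j []
          = seqMerge (dcFilt pref (dcKey line)) := by
        rw [List.getD_eq_getElem _ _ (by simpa using hj), List.getElem_map]
        rw [← List.getD_eq_getElem keys ("", "") hj, hgd]
      have hstepA :
          dcStepA (PySem.Dict.mk (keys.zipIdx 0),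
              keys.map (fun k' => seqMerge (dcFilt pref k'))) line
            = (PySem.Dict.mk (keys.zipIdx 0),
               keys.map (fun k' => seqMerge (dcFilt (pref ++ [line]) k'))) := by
        simp only [dcStepA, hget, Nat.zero_add]
        refine Prod.ext rfl ?_
        simp only [hgetD]
        rw [map_set_key keys _ j (dcKey line) _ hnd hj hgd]
        apply List.map_congr_left
        intro k' hk'
        by_cases h : k' = dcKey line
        · rw [if_pos h, h, hfilt_k, seqMerge_append _ _ hne]
        · rw [if_neg h, hfilt_ne k' h]
      have hmemitems : (dcKey line, dcFilt pref (dcKey line))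
          ∈ keys.map (fun k' => (k', dcFilt pref k')) :=
        List.mem_map_of_mem hk
      have hndk : (PySem.Dict.mk (keys.map (fun k' => (k', dcFilt pref k')))).keys.Nodup := by
        simpa [PySem.Dict.keys_mk, List.map_map, Function.comp_def] using hnd
      have hcont : (PySem.Dict.mk (keys.map (fun k' => (k', dcFilt pref k')))).contains
          (dcKey line) = true := by
        rw [PySem.Dict.contains_eq_isSome_get?,
          PySem.Dict.get?_of_mem_items _ hmemitems hndk]
        rfl
      have hBgetD : (PySem.Dict.mk (keys.map (fun k' => (k', dcFilt pref k')))).getD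
          (dcKey line) [] = dcFilt pref (dcKey line) :=
        PySem.Dict.getD_of_mem_items _ hmemitems hndk []
      have hstepB :
          dcGroupStep (PySem.Dict.mk (keys.map (fun k' => (k', dcFilt pref k')))) line
            = PySem.Dict.mk (keys.map (fun k' => (k', dcFilt (pref ++ [line]) k'))) := by
        simp only [dcGroupStep, PySem.Dict.modify]
        apply PySem.Dict.ext
        rw [PySem.Dict.items_insert_of_contains _ _ hcont, hBgetD]
        simp only [List.map_map]
        apply List.map_congr_left
        intro k' hk'
        by_cases h : k' = dcKey line
        · simp [Function.comp, h, hfilt_k]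
        · have : (k' == dcKey line) = false := by simpa using h
          simp [Function.comp, this, hfilt_ne k' h]
      rw [hstepA, hstepB]
      apply ih (pref ++ [line]) keys hdata' hnd
      intro k'
      rw [hkeys k']
      constructor
      · rintro ⟨r, hr, hrk⟩; exact ⟨r, by simp [hr], hrk⟩
      · rintro ⟨r, hr, hrk⟩
        rcases List.mem_append.1 hr with hr | hr
        · exact ⟨r, hr, hrk⟩
        · have : r = line := by simpa using hr
          subst this; subst hrk; exact (hkeys _).1 hk |>.imp fun x h => h
    · rcases idxLookup keys 0 (dcKey line) with ⟨hnone, _⟩ | ⟨j, hj, hget, hgd⟩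
      swap
      · exfalso
        apply hk
        rw [← hgd, List.getD_eq_getElem keys ("", "") hj]
        exact List.getElem_mem _
      have hfilt_nil : dcFilt pref (dcKey line) = [] := by
        rw [dcFilt, List.filter_eq_nil_iff]
        intro r hr hkr
        exact hk ((hkeys _).2 ⟨r, hr, by simpa using hkr⟩)
      have hcontA : (PySem.Dict.mk (keys.zipIdx 0)).contains (dcKey line) = false := by
        rw [PySem.Dict.contains_eq_isSome_get?, hnone]; rfl
      have hstepA :
          dcStepA (PySem.Dict.mk (keys.zipIdx 0),
              keys.map (fun k' => seqMerge (dcFilt pref k'))) line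
            = (PySem.Dict.mk ((keys ++ [dcKey line]).zipIdx 0),
               (keys ++ [dcKey line]).map (fun k' => seqMerge (dcFilt (pref ++ [line]) k'))) := by
        simp only [dcStepA, hnone]
        refine Prod.ext ?_ ?_
        · apply PySem.Dict.ext
          rw [PySem.Dict.items_insert_of_not_contains _ _ hcontA]
          simp [List.zipIdx_append]
        · simp only [List.map_append]
          congr 1
          · apply List.map_congr_left
            intro k' hk'
            rw [hfilt_ne k' (by rintro rfl; exact hk hk')]
          · simp [hfilt_k, hfilt_nil, seqMerge]
      have hcontB : (PySem.Dict.mk (keys.map (fun k' => (k', dcFilt pref k')))).contains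
          (dcKey line) = false := by
        rw [PySem.Dict.contains_eq_decide_mem_keys]
        simp only [PySem.Dict.keys_mk, List.map_map]
        simpa [Function.comp] using hk
      have hstepB :
          dcGroupStep (PySem.Dict.mk (keys.map (fun k' => (k', dcFilt pref k')))) line
            = PySem.Dict.mk ((keys ++ [dcKey line]).map
                (fun k' => (k', dcFilt (pref ++ [line]) k'))) := by
        simp only [dcGroupStep, PySem.Dict.modify]
        apply PySem.Dict.ext
        rw [PySem.Dict.items_insert_of_not_contains _ _ hcontB,
          PySem.Dict.getD_of_not_contains _ _ hcontB]
        simp only [List.map_append, List.map_cons, List.map_nil, List.nil_append]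
        congr 1
        · apply List.map_congr_left
          intro k' hk'
          rw [hfilt_ne k' (by rintro rfl; exact hk hk')]
        · simp [hfilt_k, hfilt_nil]
      rw [hstepA, hstepB]
      apply ih (pref ++ [line]) (keys ++ [dcKey line]) hdata'
      · rw [List.nodup_append]
        refine ⟨hnd, List.nodup_singleton _, ?_⟩
        intro a ha b hb
        have hb' : b = dcKey line := by simpa using hb
        subst hb'
        exact fun h => hk (h ▸ ha)
      · intro k'
        constructor
        · intro hmem
          rcases List.mem_append.1 hmem with hmem | hmem
          · obtain ⟨r, hr, hrk⟩ := (hkeys k').1 hmem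
            exact ⟨r, by simp [hr], hrk⟩
          · have : k' = dcKey line := by simpa using hmem
            exact ⟨line, by simp, this.symm⟩
        · rintro ⟨r, hr, hrk⟩
          rcases List.mem_append.1 hr with hr | hr
          · exact List.mem_append.2 (Or.inl ((hkeys k').2 ⟨r, hr, hrk⟩))
          · have : r = line := by simpa using hr
            subst this; simp [← hrk]

-- ===== VERDICT (by name: the statement is the Claim_ definition above) =====
theorem double_check_spec : Claim_equal_double_check := by
  intro data _hdom hpre
  unfold Spec_double_check double_check double_check_alt
  have h := dc_loop data hpre data [] [] rfl (by simp) (by simp)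
  simpa [dcFilt] using h
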